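-- pv_equiv track=rewrite | github.com/A3Tom/challenges | project_euler/problem/026/tiling_pattern_solution.py | get_tiling_pattern
-- ===== SOURCE A (Python) =====
-- def get_tiling_pattern(s: str):
--     i = 0
--     border = ''
--     while i < len(s):
--         prefix = s[0:i]
--         suffix = s[len(s)-i:len(s)]
--
--         if prefix == suffix and len(prefix) > len(border):
--             border = prefix
--         i+= 1
--
--     return s[:-len(border)]
-- ===== SOURCE B (Python) =====
-- def get_tiling_pattern(s: str):
--     # KMP failure function: k ends as the length of the longest proper border of s.
--     pi = [0] * len(s)
--     k = 0
--     for i in range(1, len(s)):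
--         while k > 0 and s[i] != s[k]:
--             k = pi[k - 1]
--         if s[i] == s[k]:
--             k += 1
--         pi[i] = k
--     return s[:-k]
-- ===== Notes on version B (the rewrite author's own statement) =====
-- stated objective: faster
-- what changed: Replaced the quadratic scan that compares every prefix s[:i] with the equal-length suffix by the KMP failure-function computed in one linear pass; the final border length is the last failure value, and the result is the same slice s[:-k].
import Mathlib
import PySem

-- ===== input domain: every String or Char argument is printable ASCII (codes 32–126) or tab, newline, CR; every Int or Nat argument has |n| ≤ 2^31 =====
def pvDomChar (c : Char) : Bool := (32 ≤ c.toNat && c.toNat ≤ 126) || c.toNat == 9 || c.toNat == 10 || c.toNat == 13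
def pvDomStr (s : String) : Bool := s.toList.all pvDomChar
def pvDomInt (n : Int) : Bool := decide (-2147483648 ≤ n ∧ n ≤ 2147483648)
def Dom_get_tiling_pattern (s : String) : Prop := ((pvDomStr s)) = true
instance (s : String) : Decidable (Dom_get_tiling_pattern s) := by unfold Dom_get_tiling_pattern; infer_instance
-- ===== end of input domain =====

-- B replaces A's quadratic prefix/suffix scan by the linear KMP failure function (faster, asymptotic);
-- both end with the same slice s[:-k], so the empty-border case returns '' in both.


-- ===== PORT A =====
-- loop body of A's while-loop (i counts 0,1,…,len(s)-1, so the loop is a fold over range(0, len(s)))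
def tilingStepA (cs : List Char) (border : List Char) (i : Int) : List Char :=
  let pre := PySem.List.slice cs (some 0) (some i)
  let suf := PySem.List.slice cs (some ((cs.length : Int) - i)) (some (cs.length : Int))
  if pre = suf ∧ border.length < pre.length then pre else border

def get_tiling_pattern (s : String) : String :=
  let cs := s.toList
  let border := (PySem.List.pyRange 0 (cs.length : Int) 1).foldl (tilingStepA cs) []
  String.ofList (PySem.List.slice cs none (some (-(border.length : Int))))

-- ===== PORT B =====
-- the 'while k > 0 and s[i] != s[k]' loop; all indices are in range, so pyGetD's default is never used;
-- fuel = current k bounds the number of iterations (k strictly decreases each pass)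
def kmpFall (cs : List Char) (pi : List Nat) (c : Char) : Nat → Nat → Nat
  | 0, k => k
  | fuel + 1, k =>
    if 0 < k ∧ PySem.List.pyGetD cs (k : Int) ' ' ≠ c then
      kmpFall cs pi c fuel (pi.getD (k - 1) 0)
    else k

-- loop body of B's 'for i in range(1, len(s))'
def tilingStepB (cs : List Char) (st : List Nat × Nat) (i : Int) : List Nat × Nat :=
  let c := PySem.List.pyGetD cs i ' '
  let k₀ := kmpFall cs st.1 c st.2 st.2
  let k := if PySem.List.pyGetD cs (k₀ : Int) ' ' = c then k₀ + 1 else k₀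
  (st.1.set i.toNat k, k)

def get_tiling_pattern_alt (s : String) : String :=
  let cs := s.toList
  let st := (PySem.List.pyRange 1 (cs.length : Int) 1).foldl (tilingStepB cs)
      (List.replicate cs.length 0, 0)
  String.ofList (PySem.List.slice cs none (some (-(st.2 : Int))))

-- ===== PRECONDITION & SPEC =====
def Spec_get_tiling_pattern (s : String) (out : String) : Prop := out = get_tiling_pattern_alt s
instance (s : String) (out : String) : Decidable (Spec_get_tiling_pattern s out) := by unfold Spec_get_tiling_pattern; infer_instance

-- ===== CLAIM (what is proved, stated in full; the proofs are below) =====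
def Claim_equal_get_tiling_pattern : Prop := ∀ (s : String), Dom_get_tiling_pattern s → Spec_get_tiling_pattern s (get_tiling_pattern s)

-- ===== LEMMAS AND PROOFS =====

def isBord (cs : List Char) (b : Nat) : Prop := cs.take b = cs.drop (cs.length - b)
def bord (cs : List Char) : Nat :=
  Nat.findGreatest (fun b => cs.take b = cs.drop (cs.length - b)) (cs.length - 1)

theorem bord_isBord (cs : List Char) : isBord cs (bord cs) :=
  Nat.findGreatest_spec (Nat.zero_le _) (by simp)

theorem isBord_take_iff {cs : List Char} {k b : Nat} (hk : isBord cs k) (hkl : k ≤ cs.length)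
    (hb : b ≤ k) : isBord (cs.take k) b ↔ isBord cs b := by
  unfold isBord at *
  have hlen : (cs.take k).length = k := by simp [List.length_take]; omega
  have h1 : (cs.take k).take b = cs.take b := by rw [List.take_take]; congr 1; omega
  have h2 : (cs.take k).drop (k - b) = cs.drop (cs.length - b) := by
    rw [hk, List.drop_drop]; congr 1; omega
  rw [hlen, h1, h2]

theorem isBord_snoc_succ {cs : List Char} {c : Char} {b : Nat} (hb : b < cs.length) :
    isBord (cs ++ [c]) (b + 1) ↔ isBord cs b ∧ cs.getD b ' ' = c := by
  unfold isBord
  have hlen : (cs ++ [c]).length = cs.length + 1 := by simp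
  have h1 : (cs ++ [c]).take (b + 1) = cs.take b ++ [cs.getD b ' '] := by
    rw [List.take_append_of_le_length (by omega), List.take_succ]
    congr 1
    simp [List.getD, List.getElem?_eq_getElem hb]
  have h2 : (cs ++ [c]).drop ((cs ++ [c]).length - (b + 1)) = cs.drop (cs.length - b) ++ [c] := by
    rw [hlen, List.drop_append_of_le_length (by omega)]
    congr 2; omega
  rw [h1, h2]
  constructor
  · intro h
    have := List.append_inj h (by simp [List.length_take, List.length_drop]; omega)
    exact ⟨this.1, by simpa using this.2⟩
  · rintro ⟨h1, h2⟩; rw [h1, h2]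

theorem le_bord {cs : List Char} {b : Nat} (h : isBord cs b) (hb : b ≤ cs.length - 1) :
    b ≤ bord cs :=
  Nat.le_findGreatest hb h

theorem bord_le (cs : List Char) : bord cs ≤ cs.length - 1 :=
  Nat.findGreatest_le _

theorem bord_snoc_le (cs : List Char) (c : Char) : bord (cs ++ [c]) ≤ bord cs + 1 := by
  rcases Nat.eq_zero_or_pos (bord (cs ++ [c])) with h | h
  · omega
  · obtain ⟨b, hb⟩ : ∃ b, bord (cs ++ [c]) = b + 1 := ⟨bord (cs ++ [c]) - 1, by omega⟩
    have hle := bord_le (cs ++ [c])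
    have hblt : b < cs.length := by simp at hle; omega
    have := (isBord_snoc_succ hblt).mp (hb ▸ bord_isBord (cs ++ [c]))
    have := le_bord this.1 (by omega)
    omega

theorem fall_main (cs : List Char) (pi : List Nat) (c : Char) (m : Nat)
    (hm : 1 ≤ m) (hmn : m ≤ cs.length)
    (hpi : ∀ j, j < m → pi.getD j 0 = bord (cs.take (j + 1))) :
    ∀ k, k < m → isBord (cs.take m) k → bord (cs.take m ++ [c]) ≤ k + 1 →
    ∀ fuel, k ≤ fuel →
    (if PySem.List.pyGetD cs ((kmpFall cs pi c fuel k : Nat) : Int) ' ' = c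
       then kmpFall cs pi c fuel k + 1 else kmpFall cs pi c fuel k)
      = bord (cs.take m ++ [c]) := by
  intro k
  induction k using Nat.strong_induction_on with
  | _ k IH =>
  intro hkm hkb hbound fuel hfuel
  have hlm : (cs.take m).length = m := by simp; omega
  have hgetm : ∀ b, b < m → cs.getD b ' ' = (cs.take m).getD b ' ' := by
    intro b hb
    simp only [List.getD]; rw [List.getElem?_take_of_lt hb]
  have hget : ∀ b : Nat, PySem.List.pyGetD cs ((b : Nat) : Int) ' ' = cs.getD b ' ' := by
    intro b; simp [PySem.List.pyGetD_natCast, List.getD]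
  -- the final if, once kmpFall has stopped at some k' with (k' = 0 ∨ cs[k'] = c)
  have final : ∀ k', k' < m → isBord (cs.take m) k' → bord (cs.take m ++ [c]) ≤ k' + 1 →
      (k' = 0 ∨ cs.getD k' ' ' = c) →
      (if PySem.List.pyGetD cs ((k' : Nat) : Int) ' ' = c then k' + 1 else k')
        = bord (cs.take m ++ [c]) := by
    intro k' hk'm hk'b hbd hstop
    rw [hget k']
    by_cases hc : cs.getD k' ' ' = c
    · rw [if_pos hc]
      have h1 : isBord (cs.take m ++ [c]) (k' + 1) := by
        rw [isBord_snoc_succ (cs := cs.take m) (b := k') (by omega)]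
        exact ⟨hk'b, by rw [← hgetm k' hk'm]; exact hc⟩
      have h2 := le_bord h1 (by rw [List.length_append]; simp only [List.length_singleton]; omega)
      omega
    · rw [if_neg hc]
      have hk0 : k' = 0 := by rcases hstop with h | h; exact h; exact absurd h hc
      subst hk0
      rcases Nat.eq_zero_or_pos (bord (cs.take m ++ [c])) with h | h
      · omega
      · exfalso
        have hb1 : bord (cs.take m ++ [c]) = 1 := by omega
        have := (isBord_snoc_succ (cs := cs.take m) (b := 0) (by omega)).mp (hb1 ▸ bord_isBord _)
        exact hc (by rw [hgetm 0 hm]; exact this.2)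
  cases fuel with
  | zero =>
    have hk0 : k = 0 := by omega
    subst hk0
    exact final 0 (by omega) hkb hbound (Or.inl rfl)
  | succ f =>
    rw [kmpFall]
    by_cases hcond : 0 < k ∧ PySem.List.pyGetD cs ((k : Nat) : Int) ' ' ≠ c
    · rw [if_pos hcond]
      obtain ⟨hk0, hne⟩ := hcond
      rw [hget k] at hne
      have htk : (cs.take m).take k = cs.take k := by
        rw [List.take_take]; congr 1; omega
      set k₁ := pi.getD (k - 1) 0 with hk₁def
      have hk₁ : k₁ = bord (cs.take k) := by
        have hk1eq : k - 1 + 1 = k := by omega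
        rw [hk₁def, hpi (k - 1) (by omega), hk1eq]
      have hlenk : (cs.take k).length = k := by simp; omega
      have hk₁lt : k₁ < k := by
        have := bord_le (cs.take k); rw [hlenk] at this; omega
      have hbordk1 : isBord (cs.take k) k₁ := by rw [hk₁]; exact bord_isBord _
      have hk₁bord : isBord (cs.take m) k₁ := by
        rw [← isBord_take_iff hkb (by omega) (le_of_lt hk₁lt), htk]
        exact hbordk1
      have hbound₁ : bord (cs.take m ++ [c]) ≤ k₁ + 1 := by
        rcases Nat.eq_zero_or_pos (bord (cs.take m ++ [c])) with h | h
        · omega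
        · obtain ⟨b, hb⟩ : ∃ b, bord (cs.take m ++ [c]) = b + 1 :=
            ⟨bord (cs.take m ++ [c]) - 1, by omega⟩
          have hle := bord_le (cs.take m ++ [c])
          have hblt : b < m := by simp at hle; omega
          have hsp := (isBord_snoc_succ (cs := cs.take m) (b := b) (by omega)).mp (hb ▸ bord_isBord _)
          have hbk : b ≠ k := by
            intro he
            exact hne (by rw [hgetm k hkm, ← he]; exact hsp.2)
          have hblt' : b < k := by omega
          have hbtk : isBord (cs.take k) b := by
            rw [← htk, isBord_take_iff hkb (by omega) (le_of_lt hblt')]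
            exact hsp.1
          have := le_bord hbtk (by rw [hlenk]; omega)
          omega
      exact IH k₁ hk₁lt (by omega) hk₁bord hbound₁ f (by omega)
    · rw [if_neg hcond]
      rw [hget k] at hcond
      push_neg at hcond
      apply final k hkm hkb hbound
      by_cases h0 : k = 0
      · exact Or.inl h0
      · exact Or.inr (hcond (by omega))

theorem bord_take_one (cs : List Char) : bord (cs.take 1) = 0 := by
  have := bord_le (cs.take 1)
  have : (cs.take 1).length ≤ 1 := by simp
  omega

theorem kmp_inv (cs : List Char) : ∀ m, 1 ≤ m → m ≤ cs.length →
    ((PySem.List.pyRange 1 (m : Int) 1).foldl (tilingStepB cs)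
        (List.replicate cs.length 0, 0)).1.length = cs.length ∧
    (∀ j, j < m →
      ((PySem.List.pyRange 1 (m : Int) 1).foldl (tilingStepB cs)
        (List.replicate cs.length 0, 0)).1.getD j 0 = bord (cs.take (j + 1))) ∧
    ((PySem.List.pyRange 1 (m : Int) 1).foldl (tilingStepB cs)
        (List.replicate cs.length 0, 0)).2 = bord (cs.take m) := by
  intro m
  induction m with
  | zero => omega
  | succ m ih =>
    intro _ hmn
    rcases Nat.eq_zero_or_pos m with hm0 | hm1
    · subst hm0
      rw [show ((1 : Nat) : Int) = 1 by norm_num, PySem.List.pyRange_one_eq_nil (by omega)]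
      refine ⟨by simp, ?_, ?_⟩
      · intro j hj
        have hj0 : j = 0 := by omega
        subst hj0
        simp [bord_take_one]
      · simp [bord_take_one]
    · obtain ⟨hlen, hpi, hk⟩ := ih hm1 (by omega)
      have hsplit : PySem.List.pyRange 1 ((m + 1 : Nat) : Int) 1
          = PySem.List.pyRange 1 (m : Int) 1 ++ [(m : Int)] := by
        push_cast
        exact PySem.List.pyRange_one_succ_right (by exact_mod_cast hm1)
      rw [hsplit, List.foldl_append, List.foldl_cons, List.foldl_nil]
      set st := (PySem.List.pyRange 1 (m : Int) 1).foldl (tilingStepB cs)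
        (List.replicate cs.length 0, 0) with hst
      have hmlt : m < cs.length := by omega
      have hc : PySem.List.pyGetD cs ((m : Nat) : Int) ' ' = cs.getD m ' ' := by
        simp [PySem.List.pyGetD_natCast, List.getD]
      have hlm : (cs.take m).length = m := by simp; omega
      have hkm : st.2 < m := by
        have := bord_le (cs.take m)
        omega
      have hfall := fall_main cs st.1 (cs.getD m ' ') m hm1 (by omega) hpi st.2 hkm
        (hk ▸ bord_isBord (cs.take m)) (by rw [hk]; exact bord_snoc_le _ _) st.2 (le_refl _)
      have htake : cs.take (m + 1) = cs.take m ++ [cs.getD m ' '] := by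
        rw [List.take_add_one]
        simp [List.getD, List.getElem?_eq_getElem hmlt]
      have hknew : (tilingStepB cs st (m : Int)).2 = bord (cs.take (m + 1)) := by
        simp only [tilingStepB, hc]
        rw [htake]
        exact hfall
      refine ⟨?_, ?_, hknew⟩
      · simp [tilingStepB, hlen]
      · intro j hj
        rcases Nat.lt_or_ge j m with hjm | hjm
        · have heq : (tilingStepB cs st (m : Int)).1.getD j 0 = st.1.getD j 0 := by
            simp only [tilingStepB, Int.toNat_natCast]
            simp [List.getD, List.getElem?_set_ne (show m ≠ j by omega)]
          rw [heq]
          exact hpi j hjm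
        · have hjeq : j = m := by omega
          rw [hjeq]
          have heq : (tilingStepB cs st (m : Int)).1.getD m 0 = (tilingStepB cs st (m : Int)).2 := by
            simp only [tilingStepB, Int.toNat_natCast]
            simp [List.getD, hlen, hmlt]
          rw [heq, hknew]

theorem foldA (cs : List Char) : ∀ m, m ≤ cs.length →
    (PySem.List.pyRange 0 (m : Int) 1).foldl (tilingStepA cs) []
      = cs.take (Nat.findGreatest (fun b => cs.take b = cs.drop (cs.length - b)) (m - 1)) := by
  intro m
  induction m with
  | zero =>
    intro _
    rw [show ((0 : Nat) : Int) = 0 by norm_num, PySem.List.pyRange_one_eq_nil (by omega)]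
    simp
  | succ m ih =>
    intro hmn
    have hsplit : PySem.List.pyRange 0 ((m + 1 : Nat) : Int) 1
        = PySem.List.pyRange 0 (m : Int) 1 ++ [(m : Int)] := by
      push_cast
      exact PySem.List.pyRange_one_succ_right (by omega)
    rw [hsplit, List.foldl_append, List.foldl_cons, List.foldl_nil, ih (by omega)]
    have hmlt : m < cs.length := by omega
    have hpre : PySem.List.slice cs (some 0) (some (m : Int)) = cs.take m := by
      rw [PySem.List.slice_zero_start, PySem.List.slice_to_natCast]
    have hsufcast : ((cs.length : Int) - (m : Int)) = ((cs.length - m : Nat) : Int) := by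
      omega
    have hsuf : PySem.List.slice cs (some ((cs.length : Int) - (m : Int)))
        (some (cs.length : Int)) = cs.drop (cs.length - m) := by
      rw [hsufcast, PySem.List.slice_natCast]
      apply List.take_of_length_le
      simp
    have hlg : ∀ b ≤ cs.length, (cs.take b).length = b := by
      intro b hb; simp; omega
    have hg := Nat.findGreatest_le (P := fun b => cs.take b = cs.drop (cs.length - b)) (n := m - 1)
    simp only [tilingStepA, hpre, hsuf]
    rcases Nat.eq_zero_or_pos m with hm0 | hm1
    · subst hm0
      rw [if_neg]
      rintro ⟨-, hlt⟩
      rw [hlg 0 (by omega)] at hlt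
      omega
    · have hfg : Nat.findGreatest (fun b => cs.take b = cs.drop (cs.length - b)) (m + 1 - 1)
          = if cs.take m = cs.drop (cs.length - m) then m
            else Nat.findGreatest (fun b => cs.take b = cs.drop (cs.length - b)) (m - 1) := by
        have : m + 1 - 1 = (m - 1) + 1 := by omega
        rw [this, Nat.findGreatest_succ]
        have : m - 1 + 1 = m := by omega
        rw [this]
    
      by_cases hP : cs.take m = cs.drop (cs.length - m)
      · rw [if_pos ⟨hP, by rw [hlg _ (by omega), hlg _ (by omega)]; omega⟩, hfg, if_pos hP]
      · rw [if_neg (by rintro ⟨h, -⟩; exact hP h), hfg, if_neg hP]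

theorem main_eq (s : String) : get_tiling_pattern s = get_tiling_pattern_alt s := by
  unfold get_tiling_pattern get_tiling_pattern_alt
  simp only []
  set cs := s.toList with hcs
  have hA := foldA cs cs.length (le_refl _)
  rw [hA]
  have hblen : (cs.take (Nat.findGreatest (fun b => cs.take b = cs.drop (cs.length - b))
      (cs.length - 1))).length = Nat.findGreatest (fun b => cs.take b = cs.drop (cs.length - b))
      (cs.length - 1) := by
    have := Nat.findGreatest_le (P := fun b => cs.take b = cs.drop (cs.length - b))
      (n := cs.length - 1)
    simp
    omega
  rw [hblen]
  rcases Nat.eq_zero_or_pos cs.length with h0 | h1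
  · rw [show ((cs.length : Nat) : Int) = 0 by omega, PySem.List.pyRange_one_eq_nil (by omega)]
    simp only [List.foldl_nil]
    rw [show Nat.findGreatest (fun b => cs.take b = cs.drop (cs.length - b)) (cs.length - 1)
        = 0 by rw [show cs.length - 1 = 0 by omega]; exact Nat.findGreatest_zero]
  · obtain ⟨-, -, hk⟩ := kmp_inv cs cs.length h1 (le_refl _)
    rw [hk, List.take_length]
    rfl

-- ===== VERDICT (by name: the statement is the Claim_ definition above) =====
theorem get_tiling_pattern_spec : Claim_equal_get_tiling_pattern := by
  intro s _
  unfold Spec_get_tiling_pattern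
  exact main_eq s
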